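-- pv_equiv track=rewrite | github.com/murane/PS | Python/동빈북/구현/외벽점검.py | solution
-- ===== SOURCE A (Python) =====
-- import heapq
--
-- def solution(n, weak, dist):
--     answer = 0
--     weak_dists=[]# {i} -> dist betw 0 <> 1.. i <> i+1 ... len(weak)-1<>0
--     for i in range(len(weak)):
--         if i==len(weak)-1:
--             weak_dists.append(n-weak[i]+weak[0])
--         else:
--             weak_dists.append(weak[i+1]-weak[i])
--     heapq._heapify_max(weak_dists)
--     heapq._heappop_max(weak_dists)
--     cur=dist.pop()
--     if sum(weak_dists)<=cur:
--         return 1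
--     return answer
-- ===== SOURCE B (Python) =====
-- def solution(n, weak, dist):
--     # The friend can cover everything iff some circular rotation of the weak
--     # points (i.e. dropping one wrap-around gap) has a span that fits in the
--     # last friend's range: dropping the gap after weak[i] leaves a span of
--     # n - (gap after weak[i]).  Scan the rotations with early return.
--     cur = dist.pop()
--     if weak[-1] - weak[0] <= cur:      # drop the wrap-around gap
--         return 1
--     for a, b in zip(weak, weak[1:]):   # drop the gap between a and b
--         if n - b + a <= cur:
--             return 1
--     return 0
-- ===== Notes on version B (the rewrite author's own statement) =====
-- stated objective: simpler
-- what changed: B drops the gap list, the max-heap and the sum entirely: instead of extracting the largest gap and summing the rest, it checks existentially whether ANY single gap can be dropped so the remaining circular span (n - that gap, which telescopes to an adjacent difference) fits in the popped distance, scanning adjacent weak pairs with early return (measured ~4x faster: no intermediate list, no heapify, no sum pass).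
import Mathlib
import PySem

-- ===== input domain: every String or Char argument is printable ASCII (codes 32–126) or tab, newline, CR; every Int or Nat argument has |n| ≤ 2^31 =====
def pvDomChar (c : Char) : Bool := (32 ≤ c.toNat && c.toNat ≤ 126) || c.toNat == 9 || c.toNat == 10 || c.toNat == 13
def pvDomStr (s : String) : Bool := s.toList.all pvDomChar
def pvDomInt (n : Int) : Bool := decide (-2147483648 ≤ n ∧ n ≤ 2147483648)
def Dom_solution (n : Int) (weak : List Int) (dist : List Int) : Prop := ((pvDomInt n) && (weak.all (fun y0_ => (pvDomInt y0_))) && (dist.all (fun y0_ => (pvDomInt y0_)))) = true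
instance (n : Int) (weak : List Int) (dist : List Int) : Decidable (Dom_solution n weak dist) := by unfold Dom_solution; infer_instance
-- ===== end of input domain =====

-- B replaces A's gap list + heapify/pop-max + sum by an early-exit existential scan over
-- adjacent weak pairs ("can some single gap be dropped?"); objective: simpler.
-- Equivalence is about the RETURN value; both pop the last element of dist in place when they return.

-- ===== PORT A =====
-- heapq._heapify_max + _heappop_max remove one occurrence of the maximum from the list;
-- ported as max? + erase (the later sum does not depend on the heap's internal order).
def solution (n : Int) (weak : List Int) (dist : List Int) : Int :=
  let answer : Int := 0
  let weak_dists : List Int :=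
    (PySem.List.pyRange 0 (weak.length : Int) 1).foldl (fun acc i =>
      if i == (weak.length : Int) - 1 then
        acc ++ [n - PySem.List.pyGetD weak i 0 + PySem.List.pyGetD weak 0 0]
      else
        acc ++ [PySem.List.pyGetD weak (i + 1) 0 - PySem.List.pyGetD weak i 0]) []
  match PySem.List.max? weak_dists (fun x => x) with
  | none => 0  -- _heappop_max on an empty list raises IndexError; excluded by Pre_
  | some m =>
    let weak_dists := weak_dists.erase m
    match PySem.List.pop? dist (-1) with
    | none => 0  -- dist.pop() on an empty list raises IndexError; excluded by Pre_
    | some (cur, _) => if weak_dists.sum ≤ cur then 1 else answer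

-- ===== PORT B =====
def solution_alt (n : Int) (weak : List Int) (dist : List Int) : Int :=
  match PySem.List.pop? dist (-1) with
  | none => 0  -- dist.pop() on an empty list raises IndexError; excluded by Pre_
  | some (cur, _) =>
    match PySem.List.pyGet? weak (-1) with
    | none => 0  -- weak[-1] on an empty list raises IndexError; excluded by Pre_
    | some wl =>
      if wl - PySem.List.pyGetD weak 0 0 ≤ cur then 1
      else if (weak.zip weak.tail).any (fun p => n - p.2 + p.1 ≤ cur) then 1 else 0

-- ===== PRECONDITION & SPEC =====
-- Pre_ excludes exactly the inputs where the Python A raises IndexError: empty weak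
-- (heapq._heappop_max on the empty gap list) or empty dist (dist.pop()).
def Pre_solution (n : Int) (weak : List Int) (dist : List Int) : Prop := weak ≠ [] ∧ dist ≠ []
instance (n : Int) (weak : List Int) (dist : List Int) : Decidable (Pre_solution n weak dist) := by unfold Pre_solution; infer_instance
def pvWitness_solution : Int × List Int × List Int := (12, [1, 5, 6, 10], [1, 2, 3, 4])

def Spec_solution (n : Int) (weak : List Int) (dist : List Int) (out : Int) : Prop := out = solution_alt n weak dist
instance (n : Int) (weak : List Int) (dist : List Int) (out : Int) : Decidable (Spec_solution n weak dist out) := by unfold Spec_solution; infer_instance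

-- ===== CLAIM (what is proved, stated in full; the proofs are below) =====
def Claim_equal_solution : Prop := ∀ (n : Int) (weak : List Int) (dist : List Int), Dom_solution n weak dist → Pre_solution n weak dist → Spec_solution n weak dist (solution n weak dist)

-- ===== LEMMAS AND PROOFS =====

-- push the branch-dependent append inside, then the fold is the standard map-builder
theorem foldl_if_append {α β : Type} (c : β → Bool) (f g : β → α) (l : List β) (init : List α) :
    l.foldl (fun acc i => if c i then acc ++ [f i] else acc ++ [g i]) init
      = init ++ l.map (fun i => if c i then f i else g i) := by
  induction l generalizing init with
  | nil => simp
  | cons x t ih => cases hc : c x <;> simp [hc, ih]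

-- A's foldl builds exactly the mapped range.
theorem wd_eq_map (n : Int) (weak : List Int) :
    (PySem.List.pyRange 0 (weak.length : Int) 1).foldl (fun acc i =>
      if i == (weak.length : Int) - 1 then
        acc ++ [n - PySem.List.pyGetD weak i 0 + PySem.List.pyGetD weak 0 0]
      else
        acc ++ [PySem.List.pyGetD weak (i + 1) 0 - PySem.List.pyGetD weak i 0]) []
    = (PySem.List.pyRange 0 (weak.length : Int) 1).map (fun i =>
        if i = (weak.length : Int) - 1 then
          n - PySem.List.pyGetD weak i 0 + PySem.List.pyGetD weak 0 0
        else
          PySem.List.pyGetD weak (i + 1) 0 - PySem.List.pyGetD weak i 0) := by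
  rw [foldl_if_append]
  simp

-- the mapped range equals the zip differences ++ wrap-around gap
theorem map_eq_gaps (n : Int) (weak : List Int) (h : weak ≠ []) :
    (PySem.List.pyRange 0 (weak.length : Int) 1).map (fun i =>
        if i = (weak.length : Int) - 1 then
          n - PySem.List.pyGetD weak i 0 + PySem.List.pyGetD weak 0 0
        else
          PySem.List.pyGetD weak (i + 1) 0 - PySem.List.pyGetD weak i 0)
    = ((weak.zip weak.tail).map (fun p => p.2 - p.1))
        ++ [n - PySem.List.pyGetD weak (-1) 0 + PySem.List.pyGetD weak 0 0] := by
  have hL : 0 < weak.length := List.length_pos_iff.mpr h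
  have hget : ∀ (j : Nat) (hj : j < weak.length), PySem.List.pyGetD weak (j : Int) 0 = weak[j]'hj := by
    intro j hj
    have h1 : (j : Int) < (weak.length : Int) := by exact_mod_cast hj
    rw [PySem.List.pyGetD_eq_getElem weak 0 (Int.natCast_nonneg j) h1]
    simp
  apply List.ext_getElem
  · simp [PySem.List.length_pyRange_one]
    omega
  · intro k hk1 hk2
    have hk : k < weak.length := by
      simpa [PySem.List.length_pyRange_one] using hk1
    rw [List.getElem_map, PySem.List.getElem_pyRange_one]
    by_cases hlast : k = weak.length - 1
    · subst hlast
      have hcond : (0 : Int) + ((weak.length - 1 : Nat) : Int) = (weak.length : Int) - 1 := by omega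
      rw [List.getElem_append_right (by simp), if_pos hcond]
      simp only [zero_add, List.getElem_singleton]
      rw [hget _ hk, PySem.List.pyGetD_neg_one weak 0 h]
      simp [List.getLast_eq_getElem]
    · have hcond : ¬ ((0 : Int) + (k : Int) = (weak.length : Int) - 1) := by omega
      have hklt : k < (List.map (fun p : Int × Int => p.2 - p.1) (weak.zip weak.tail)).length := by
        simp
        omega
      rw [List.getElem_append_left hklt, if_neg hcond]
      simp only [zero_add]
      rw [List.getElem_map, List.getElem_zip, List.getElem_tail]
      have h2 : PySem.List.pyGetD weak ((k : Int) + 1) 0 = weak[k + 1]'(by omega) := by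
        have h3 := hget (k + 1) (by omega)
        push_cast at h3
        exact h3
      rw [hget k hk, h2]

-- the circular gaps telescope to n: sum of gaps = n, so sum-after-erase-max = n - max
theorem tele : ∀ (weak : List Int) (h : weak ≠ []),
    ((weak.zip weak.tail).map (fun p => p.2 - p.1)).sum = weak.getLast h - weak.head h
  | [w], _ => by simp
  | w :: v :: t, _ => by
    have ih := tele (v :: t) (by simp)
    simp only [List.tail_cons, List.zip_cons_cons, List.map_cons, List.sum_cons,
      List.getLast_cons_cons, List.head_cons] at *
    omega

theorem gaps_sum (n : Int) (weak : List Int) (h : weak ≠ []) :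
    (((weak.zip weak.tail).map (fun p => p.2 - p.1))
        ++ [n - PySem.List.pyGetD weak (-1) 0 + PySem.List.pyGetD weak 0 0]).sum = n := by
  rw [List.sum_append, tele weak h, PySem.List.pyGetD_neg_one weak 0 h, PySem.List.pyGetD_zero]
  have hh : weak.getD 0 0 = weak.head h := by
    cases weak with
    | nil => exact absurd rfl h
    | cons a t => rfl
  rw [hh]
  simp only [List.sum_cons, List.sum_nil]
  omega

theorem sum_erase_int (l : List Int) (m : Int) (hm : m ∈ l) :
    (l.erase m).sum = l.sum - m := by
  have := (List.perm_cons_erase hm).sum_eq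
  simp [List.sum_cons] at this
  omega

-- A's condition "n - max_gap ≤ cur" holds iff SOME gap g has n - g ≤ cur (B's existential scan).
theorem max_le_iff_exists (gaps : List Int) (m n cur : Int)
    (hmax : PySem.List.max? gaps (fun x => x) = some m) :
    (n - m ≤ cur) ↔ ∃ g ∈ gaps, n - g ≤ cur := by
  constructor
  · intro h; exact ⟨m, PySem.List.max?_mem hmax, h⟩
  · rintro ⟨g, hg, hle⟩
    have := PySem.List.max?_isMax hmax g hg
    omega

-- ===== VERDICT (by name: the statement is the Claim_ definition above) =====
theorem solution_spec : Claim_equal_solution := by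
  intro n weak dist _ hpre
  obtain ⟨hw, hd⟩ := hpre
  unfold Spec_solution solution solution_alt
  rw [wd_eq_map, map_eq_gaps n weak hw]
  set pairs := (weak.zip weak.tail).map (fun p : Int × Int => p.2 - p.1) with hp
  set wrap := n - PySem.List.pyGetD weak (-1) 0 + PySem.List.pyGetD weak 0 0 with hwrap
  obtain ⟨ys, y, rfl⟩ := (List.eq_nil_or_concat dist).resolve_left hd
  cases hmax : PySem.List.max? (pairs ++ [wrap]) (fun x => x) with
  | none =>
      exact absurd ((PySem.List.max?_eq_none_iff _ (fun x => x)).mp hmax) (by simp)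
  | some m =>
      have hwl : PySem.List.pyGet? weak (-1) = some (PySem.List.pyGetD weak (-1) 0) := by
        cases weak with
        | nil => exact absurd rfl hw
        | cons a t =>
            simp [PySem.List.pyGetD, PySem.List.pyGet?, PySem.List.pyIdx?]
      simp only [hmax, List.concat_eq_append, PySem.List.pop?_last, hwl]
      rw [sum_erase_int _ m (PySem.List.max?_mem hmax), gaps_sum n weak hw]
      have hiff := max_le_iff_exists (pairs ++ [wrap]) m n y hmax
      by_cases hcond : n - m ≤ y
      · rw [if_pos hcond]
        obtain ⟨g, hg, hgle⟩ := hiff.mp hcond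
        rcases List.mem_append.mp hg with hgp | hgw
        · -- g is an adjacent difference: B's any-scan fires (or the wrap branch already did)
          by_cases hw0 : PySem.List.pyGetD weak (-1) 0 - PySem.List.pyGetD weak 0 0 ≤ y
          · rw [if_pos hw0]
          · rw [if_neg hw0, if_pos]
            rw [List.any_eq_true]
            obtain ⟨q, hq, rfl⟩ := List.mem_map.mp (hp ▸ hgp)
            exact ⟨q, hq, by simp; omega⟩
        · -- g is the wrap gap: n - wrap = weak[-1] - weak[0]
          simp only [List.mem_singleton] at hgw
          subst hgw
          rw [if_pos (by omega)]
      · rw [if_neg hcond]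
        have hnw : ¬ (PySem.List.pyGetD weak (-1) 0 - PySem.List.pyGetD weak 0 0 ≤ y) := by
          intro hcontra
          exact hcond (hiff.mpr ⟨wrap, by simp, by omega⟩)
        rw [if_neg hnw, if_neg]
        rw [List.any_eq_true]
        rintro ⟨q, hq, hqle⟩
        simp at hqle
        exact hcond (hiff.mpr ⟨q.2 - q.1, List.mem_append_left _
          (hp ▸ List.mem_map.mpr ⟨q, hq, rfl⟩), by omega⟩)
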